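-- pv_equiv track=rewrite | github.com/sbirnb/AdventOfCode2023 | src/adventofcode2023/day14.py | part2
-- ===== SOURCE A (Python) =====
-- from itertools import islice
-- from typing import Tuple, Iterable, Sequence
-- from collections import Counter
--
-- def part2(input_: Iterable[str]) -> int:
--
--     def states(initial_state: Sequence[str]) -> Iterable[Sequence[str]]:
--         state = initial_state
--         while True:
--             yield state
--             for _ in range(4):
--                 state = tuple(
--                     '#'.join('.' * count['.'] + 'O' * count['O'] for count in (Counter(segment) for segment in row.split('#')))
--                     for row in (''.join(reversed(row)) for row in zip(*state))
--                 )
--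
--     def get_cycle_start(initial_state: Sequence[str]) -> Tuple[int, Sequence[str]]:
--         visited = dict()
--         for iteration, state in enumerate(states(initial_state)):
--             if state in visited:
--                 return visited[state], state
--             visited[state] = iteration
--
--     pre_cycle_iterations, cycle_start_state = get_cycle_start(tuple(row.strip() for row in input_))
--     period_length = next(
--             iteration for iteration, state in enumerate(islice(states(cycle_start_state), 1, None), 1)
--             if state == cycle_start_state
--     )
--     for _, final_state in zip(range((1000000000 - pre_cycle_iterations) % period_length + 1), states(cycle_start_state)):
--         pass
--     return sum(row.count('O') * n for n, row in enumerate(reversed(final_state), 1))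
-- ===== SOURCE B (Python) =====
-- def part2(input_):
--     # One-pass memoized simulation: record every state in a trail + index dict,
--     # stop at the first recurrence, then read the answer off the trail directly.
--     def spin(state):
--         for _ in range(4):
--             cols = [''.join(state[r][i] for r in reversed(range(len(state))))
--                     for i in range(min(map(len, state), default=0))]
--         # roll every segment: dots first, then rocks (anything else is dropped)
--             state = tuple('#'.join(seg.count('.') * '.' + seg.count('O') * 'O'
--                                    for seg in col.split('#'))
--                           for col in cols)
--         return state
--
--     state = tuple(row.strip() for row in input_)
--     seen = {}
--     trail = []
--     while state not in seen:
--         seen[state] = len(trail)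
--         trail.append(state)
--         state = spin(state)
--     first = seen[state]
--     period = len(trail) - first
--     target = first + (1000000000 - first) % period
--     final = trail[target]
--     return sum(row.count('O') * n for n, row in enumerate(reversed(final), 1))
-- ===== Notes on version B (the rewrite author's own statement) =====
-- stated objective: simpler
-- what changed: A walks the state generator three separate times (dict pass to find the cycle start, a second walk to find the period, a third walk to reach the target state); B runs one memoized simulation that records every state in a trail plus a state->index dict and then reads the period and the 10^9-th state straight off the trail by index arithmetic.
import Mathlib
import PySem

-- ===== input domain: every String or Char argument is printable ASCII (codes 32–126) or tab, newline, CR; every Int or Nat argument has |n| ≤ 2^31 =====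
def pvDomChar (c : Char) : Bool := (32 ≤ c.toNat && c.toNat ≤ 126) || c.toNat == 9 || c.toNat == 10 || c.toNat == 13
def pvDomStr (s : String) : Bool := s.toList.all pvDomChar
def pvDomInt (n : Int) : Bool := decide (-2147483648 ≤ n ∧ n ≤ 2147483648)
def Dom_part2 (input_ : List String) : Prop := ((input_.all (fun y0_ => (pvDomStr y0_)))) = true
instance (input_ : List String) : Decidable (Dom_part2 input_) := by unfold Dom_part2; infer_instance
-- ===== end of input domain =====

-- B replaces A's three separate walks (find cycle start, re-walk for the period, re-walk to the
-- target state) by one memoized pass that stores every state in a trail and indexes into it;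
-- objective: simpler decomposition (the per-cycle rock-rolling transform itself is the same task).

-- ===== PORT A =====

-- zip(*state) on char rows: truncating transpose, exact Python zip semantics (hand port)
def pvZip {α : Type} : List (List α) → List (List α)
  | ls =>
    if _h : ls = [] ∨ ls.any (·.isEmpty) then []
    else ls.filterMap (·.head?) :: pvZip (ls.map (·.tail))
termination_by ls => (ls.map List.length).sum
decreasing_by
  rw [not_or] at _h
  obtain ⟨hne, hall⟩ := _h
  rw [Bool.not_eq_true, List.any_eq_false] at hall
  have hall' : ∀ l ∈ ls, l ≠ [] := by
    intro l hl; have := hall l hl; simpa [List.isEmpty_iff] using this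
  have key : ∀ (ms : List (List α)), ms ≠ [] → (∀ l ∈ ms, l ≠ []) →
      ((ms.map (·.tail)).map List.length).sum < (ms.map List.length).sum := by
    intro ms hne hall
    induction ms with
    | nil => exact absurd rfl hne
    | cons a t ih =>
      cases a with
      | nil => exact absurd rfl (hall [] (by simp))
      | cons c cs =>
        simp only [List.map_cons, List.sum_cons, List.tail_cons]
        rcases t with _ | ⟨b, tb⟩
        · simp
        · have := ih (by simp) (fun l hl => hall l (List.mem_cons_of_mem _ hl))
          simp only [List.length_cons]
          omega
  have := key ls hne hall'
  simpa [List.map_map, Function.comp] using this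

-- '.'*count['.'] + 'O'*count['O'] for each '#'-segment (Counter port), joined by '#'
def pvRollA (row : List Char) : List Char :=
  PySem.Chars.join ['#']
    ((PySem.Chars.splitOn row ['#']).map (fun seg =>
      let count := PySem.Dict.counter seg
      List.replicate (count.getD '.' 0).toNat '.' ++ List.replicate (count.getD 'O' 0).toNat 'O'))

-- one quarter turn of the inner 4-step loop: rows = reversed columns, each rolled
def pvQuarterA (state : List (List Char)) : List (List Char) :=
  (pvZip state).map (fun col => pvRollA col.reverse)

-- one yield-to-yield step of `states`: for _ in range(4)
def pvCycleA (state : List (List Char)) : List (List Char) :=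
  pvQuarterA (pvQuarterA (pvQuarterA (pvQuarterA state)))

-- fuel bound shared by the loop ports (provably larger than the index of the first repeat)
def pvM (x0 : List (List Char)) : Nat :=
  max x0.length ((x0.map List.length).foldl max 0)
def pvFuel (x0 : List (List Char)) : Nat := 5 ^ (pvM x0 * (pvM x0 + 1)) + 3

-- get_cycle_start: enumerate states, return (visited[state], state) at the first repeat
def pvFindRepeatA (fuel : Nat) (visited : PySem.Dict (List (List Char)) Int)
    (it : Int) (st : List (List Char)) : Int × List (List Char) :=
  match fuel with
  | 0 => (0, [])
  | fuel + 1 =>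
    match visited.get? st with
    | some f => (f, st)
    | none => pvFindRepeatA fuel (visited.insert st it) (it + 1) (pvCycleA st)

-- period_length: first iteration ≥ 1 whose state equals cycle_start_state
def pvFindPeriodA (fuel : Nat) (k : Int) (st target : List (List Char)) : Int :=
  match fuel with
  | 0 => 0
  | fuel + 1 =>
    let st' := pvCycleA st
    if st' == target then k else pvFindPeriodA fuel (k + 1) st' target

-- zip(range(n+1), states(cs)): consume n+1 yields, i.e. apply the cycle n times
def pvIterA (n : Nat) (st : List (List Char)) : List (List Char) :=
  match n with
  | 0 => st
  | n + 1 => pvIterA n (pvCycleA st)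

def part2 (input_ : List String) : Int :=
  let x0 := input_.map (fun row => PySem.Chars.strip row.toList)
  let p := pvFindRepeatA (pvFuel x0) PySem.Dict.empty 0 x0
  let period := pvFindPeriodA (pvFuel x0) 1 p.2 p.2
  let final := pvIterA (PySem.Int.mod (1000000000 - p.1) period).toNat p.2
  ((PySem.List.enumerate final.reverse 1).map
    (fun q => (PySem.Chars.count q.2 ['O'] : Int) * q.1)).sum

-- ===== PORT B =====

-- seg.count('.')*'.' + seg.count('O')*'O' per segment, joined by '#'
def pvRollB (row : List Char) : List Char :=
  PySem.Chars.join ['#']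
    ((PySem.Chars.splitOn row ['#']).map (fun seg =>
      List.replicate (PySem.Chars.count seg ['.']) '.' ++
        List.replicate (PySem.Chars.count seg ['O']) 'O'))

def pvQuarterB (state : List (List Char)) : List (List Char) :=
  (pvZip state).map (fun col => pvRollB col.reverse)

def pvCycleB (state : List (List Char)) : List (List Char) :=
  pvQuarterB (pvQuarterB (pvQuarterB (pvQuarterB state)))

-- while state not in seen: seen[state] = len(trail); trail.append(state); state = spin(state)
def pvFindLoopB (fuel : Nat) (seen : PySem.Dict (List (List Char)) Int)
    (trail : List (List (List Char))) (st : List (List Char)) :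
    List (List (List Char)) × Int :=
  match fuel with
  | 0 => ([], 0)
  | fuel + 1 =>
    match seen.get? st with
    | some f => (trail, f)
    | none => pvFindLoopB fuel (seen.insert st (trail.length : Int)) (trail ++ [st]) (pvCycleB st)

def part2_alt (input_ : List String) : Int :=
  let x0 := input_.map (fun row => PySem.Chars.strip row.toList)
  let p := pvFindLoopB (pvFuel x0) PySem.Dict.empty [] x0
  let period : Int := (p.1.length : Int) - p.2
  let target := p.2 + PySem.Int.mod (1000000000 - p.2) period
  match PySem.List.pyGet? p.1 target with
  | none => 0
  | some final =>
    ((PySem.List.enumerate final.reverse 1).map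
      (fun q => (PySem.Chars.count q.2 ['O'] : Int) * q.1)).sum

-- ===== PRECONDITION & SPEC =====
def Spec_part2 (input_ : List String) (out : Int) : Prop := out = part2_alt input_
instance (input_ : List String) (out : Int) : Decidable (Spec_part2 input_ out) := by unfold Spec_part2; infer_instance

-- ===== CLAIM (what is proved, stated in full; the proofs are below) =====
def Claim_equal_part2 : Prop := ∀ (input_ : List String), Dom_part2 input_ → Spec_part2 input_ (part2 input_)

-- ===== LEMMAS AND PROOFS =====


-- ---------- join / splitOn / count groundwork ----------

theorem pv_join_snoc (sep y : List Char) (xs : List (List Char)) :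
    PySem.Chars.join sep (xs ++ [y]) =
      if xs = [] then y else PySem.Chars.join sep xs ++ sep ++ y := by
  induction xs with
  | nil => simp [PySem.Chars.join_singleton]
  | cons a t ih =>
    cases t with
    | nil => simp [PySem.Chars.join_cons_cons, PySem.Chars.join_singleton]
    | cons b tb =>
      simp only [List.cons_append, PySem.Chars.join_cons_cons]
      rw [show b :: (tb ++ [y]) = (b :: tb) ++ [y] by simp, ih]
      simp [List.append_assoc]

theorem pv_splitOn_go_join (c : Char) (fuel : Nat) (l cur : List Char) (acc : List (List Char)) :
    PySem.Chars.join [c] (PySem.Chars.splitOn.go [c] fuel l cur acc) =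
      PySem.Chars.join [c] acc.reverse ++ (if acc = [] then [] else [c]) ++ cur.reverse ++ l := by
  induction fuel generalizing l cur acc with
  | zero =>
    rw [PySem.Chars.splitOn.go.eq_def]
    simp only [List.reverse_cons]
    rw [pv_join_snoc]
    split_ifs with h1 h2 h2 <;> simp_all
  | succ fuel ih =>
    cases l with
    | nil =>
      rw [PySem.Chars.splitOn.go.eq_def]
      simp only [List.reverse_cons]
      rw [pv_join_snoc]
      split_ifs with h1 h2 h2 <;> simp_all
    | cons ch rest =>
      rw [PySem.Chars.splitOn.go.eq_def]
      simp only []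
      by_cases hc : c = ch
      · subst hc
        have hpre : [c].isPrefixOf (c :: rest) = true := by simp [List.isPrefixOf]
        rw [if_pos hpre]
        rw [ih]
        simp only [List.length_cons, List.length_nil, List.drop_succ_cons, List.drop_zero,
          List.reverse_cons]
        rw [pv_join_snoc]
        split_ifs with h1 h2 h2 <;> simp_all
      · have hpre : [c].isPrefixOf (ch :: rest) = false := by
          simp only [List.isPrefixOf, Bool.and_eq_false_iff]
          left; simpa using hc
        rw [if_neg (by simp [hpre])]
        rw [ih]
        simp [List.append_assoc]

theorem pv_splitOn_join (c : Char) (s : List Char) :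
    PySem.Chars.join [c] (PySem.Chars.splitOn s [c]) = s := by
  unfold PySem.Chars.splitOn
  rw [pv_splitOn_go_join]
  simp [PySem.Chars.join_nil]

theorem pv_join_length (sep : List Char) (ps : List (List Char)) :
    (PySem.Chars.join sep ps).length =
      (ps.map List.length).sum + (ps.length - 1) * sep.length := by
  induction ps with
  | nil => simp [PySem.Chars.join_nil]
  | cons a t ih =>
    cases t with
    | nil => simp [PySem.Chars.join_singleton]
    | cons b tb =>
      rw [PySem.Chars.join_cons_cons]
      simp only [List.length_append, ih, List.map_cons, List.sum_cons, List.length_cons,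
        Nat.succ_sub_one]
      rw [Nat.succ_mul]
      omega

theorem pv_mem_join (sep : List Char) (ps : List (List Char)) (ch : Char)
    (h : ch ∈ PySem.Chars.join sep ps) : ch ∈ sep ∨ ∃ p ∈ ps, ch ∈ p := by
  induction ps with
  | nil => simp [PySem.Chars.join_nil] at h
  | cons a t ih =>
    cases t with
    | nil =>
      rw [PySem.Chars.join_singleton] at h
      exact Or.inr ⟨a, by simp, h⟩
    | cons b tb =>
      rw [PySem.Chars.join_cons_cons] at h
      simp only [List.mem_append] at h
      rcases h with (h | h) | h
      · exact Or.inr ⟨a, by simp, h⟩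
      · exact Or.inl h
      · rcases ih h with h' | ⟨p, hp, hcp⟩
        · exact Or.inl h'
        · exact Or.inr ⟨p, List.mem_cons_of_mem _ hp, hcp⟩

theorem pv_count_go (c : Char) (fuel : Nat) (l : List Char) (acc : Nat)
    (h : l.length ≤ fuel) : PySem.Chars.count.go [c] fuel l acc = acc + l.count c := by
  induction fuel generalizing l acc with
  | zero =>
    rw [PySem.Chars.count.go.eq_def]
    have : l = [] := by simpa [List.length_eq_zero_iff] using h
    simp [this]
  | succ fuel ih =>
    cases l with
    | nil => rw [PySem.Chars.count.go.eq_def]; simp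
    | cons ch rest =>
      rw [PySem.Chars.count.go.eq_def]
      simp only []
      by_cases hc : c = ch
      · subst hc
        rw [if_pos (by simp [List.isPrefixOf])]
        simp only [List.length_cons, List.length_nil, List.drop_succ_cons, List.drop_zero]
        rw [ih _ _ (by simpa using h)]
        simp
        omega
      · rw [if_neg (by simp [hc])]
        rw [ih _ _ (by simpa using h)]
        simp [Ne.symm hc]

theorem pv_count_single (s : List Char) (c : Char) :
    PySem.Chars.count s [c] = s.count c := by
  unfold PySem.Chars.count
  rw [if_neg (by simp)]
  rw [pv_count_go c s.length s 0 le_rfl]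
  simp

theorem pv_count_disjoint (s : List Char) : s.count '.' + s.count 'O' ≤ s.length := by
  induction s with
  | nil => simp
  | cons a t ih =>
    simp only [List.count_cons, List.length_cons]
    by_cases h1 : a = '.' <;> by_cases h2 : a = 'O' <;> simp [h1, h2] at * <;> omega

-- ---------- the two transforms agree ----------

theorem pv_roll_eq : pvRollB = pvRollA := by
  funext row
  unfold pvRollB pvRollA
  have : (fun seg => List.replicate (PySem.Chars.count seg ['.']) '.' ++
        List.replicate (PySem.Chars.count seg ['O']) 'O') =
      (fun seg : List Char =>
        let count := PySem.Dict.counter seg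
        List.replicate (count.getD '.' 0).toNat '.' ++
          List.replicate (count.getD 'O' 0).toNat 'O') := by
    funext seg
    simp [pv_count_single, PySem.Dict.getD_counter]
  rw [this]

theorem pv_quarter_eq : pvQuarterB = pvQuarterA := by
  unfold pvQuarterB pvQuarterA; rw [pv_roll_eq]

theorem pv_cycle_eq : pvCycleB = pvCycleA := by
  unfold pvCycleB pvCycleA; rw [pv_quarter_eq]

-- ---------- size and alphabet invariants ----------

def pvDims (M : Nat) (st : List (List Char)) : Prop :=
  st.length ≤ M ∧ ∀ r ∈ st, r.length ≤ M

def pvAlpha (st : List (List Char)) : Prop :=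
  ∀ r ∈ st, ∀ ch ∈ r, ch = '.' ∨ ch = 'O' ∨ ch = '#'

theorem pv_mem_roll (row : List Char) (ch : Char) (h : ch ∈ pvRollA row) :
    ch = '.' ∨ ch = 'O' ∨ ch = '#' := by
  unfold pvRollA at h
  rcases pv_mem_join _ _ _ h with h' | ⟨p, hp, hcp⟩
  · right; right; simpa using h'
  · simp only [List.mem_map] at hp
    obtain ⟨seg, _, rfl⟩ := hp
    simp only [List.mem_append, List.mem_replicate] at hcp
    rcases hcp with ⟨_, rfl⟩ | ⟨_, rfl⟩
    · left; rfl
    · right; left; rfl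

theorem pv_roll_length (row : List Char) : (pvRollA row).length ≤ row.length := by
  conv_rhs => rw [← pv_splitOn_join '#' row]
  unfold pvRollA
  rw [pv_join_length, pv_join_length]
  simp only [List.map_map, List.length_map]
  have hsum : ((PySem.Chars.splitOn row ['#']).map
        (List.length ∘ fun seg =>
          List.replicate ((PySem.Dict.counter seg).getD '.' 0).toNat '.' ++
            List.replicate ((PySem.Dict.counter seg).getD 'O' 0).toNat 'O')).sum ≤
      ((PySem.Chars.splitOn row ['#']).map List.length).sum := by
    apply List.sum_le_sum
    intro seg _
    simp only [Function.comp_apply, List.length_append, List.length_replicate,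
      PySem.Dict.getD_counter, Int.toNat_natCast]
    have := pv_count_disjoint seg
    simpa [List.count] using this
  omega

theorem pv_zip_length_le {α : Type} (ls : List (List α)) (l : List α) (h : l ∈ ls) :
    (pvZip ls).length ≤ l.length := by
  revert l h
  fun_induction pvZip ls with
  | case1 ls h1 => intro l h; simp
  | case2 ls hlet hcond ih =>
    intro l h
    rw [not_or, Bool.not_eq_true, List.any_eq_false] at hcond
    obtain ⟨hne, hall⟩ := hcond
    have hlne : l ≠ [] := by
      intro hl; subst hl; simpa [List.isEmpty_iff] using hall [] h
    have hmap : ls.attach.map (fun x => (x.val).tail) = ls.map (·.tail) := by simp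
    have htl : l.tail ∈ ls.attach.map (fun x => (x.val).tail) := by
      rw [hmap]; exact List.mem_map_of_mem h
    have hrec := ih l.tail htl
    rw [hmap] at hrec
    simp only [List.length_cons]
    cases l with
    | nil => exact absurd rfl hlne
    | cons a t => simpa using hrec

theorem pv_mem_zip_length {α : Type} (ls : List (List α)) (col : List α)
    (h : col ∈ pvZip ls) : col.length ≤ ls.length := by
  revert col h
  fun_induction pvZip ls with
  | case1 ls h1 => intro col h; simp at h
  | case2 ls hlet hcond ih =>
    intro col h
    have hmap : ls.attach.map (fun x => (x.val).tail) = ls.map (·.tail) := by simp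
    rcases List.mem_cons.mp h with rfl | hcol
    · simpa using List.length_filterMap_le (fun x : List α => x.head?) ls
    · have := ih col (by rw [hmap]; exact hcol)
      simpa [hmap] using this

theorem pv_quarter_dims (M : Nat) (st : List (List Char)) (h : pvDims M st) :
    pvDims M (pvQuarterA st) := by
  obtain ⟨hlen, hrows⟩ := h
  constructor
  · rw [pvQuarterA, List.length_map]
    cases st with
    | nil => simp [pvZip]
    | cons a t =>
      exact le_trans (pv_zip_length_le _ a (by simp)) (hrows a (by simp))
  · intro r hr
    rw [pvQuarterA] at hr
    obtain ⟨col, hcol, rfl⟩ := List.mem_map.mp hr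
    calc (pvRollA col.reverse).length ≤ col.reverse.length := pv_roll_length _
    _ = col.length := by simp
    _ ≤ st.length := pv_mem_zip_length st col hcol
    _ ≤ M := hlen

theorem pv_quarter_alpha (st : List (List Char)) : pvAlpha (pvQuarterA st) := by
  intro r hr ch hch
  rw [pvQuarterA] at hr
  obtain ⟨col, _, rfl⟩ := List.mem_map.mp hr
  exact pv_mem_roll _ ch hch

def pvSeq (x0 : List (List Char)) (k : Nat) : List (List Char) := pvCycleA^[k] x0

theorem pv_seq_succ (x0 : List (List Char)) (k : Nat) :
    pvSeq x0 (k + 1) = pvCycleA (pvSeq x0 k) := Function.iterate_succ_apply' _ _ _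

theorem pv_seq_dims (x0 : List (List Char)) (k : Nat) : pvDims (pvM x0) (pvSeq x0 k) := by
  induction k with
  | zero =>
    constructor
    · exact le_max_left _ _
    · intro r hr
      have := (PySem.List.le_foldl_max (x0.map List.length) 0).2 r.length
        (List.mem_map_of_mem hr)
      exact le_trans this (le_max_right _ _)
  | succ k ih =>
    rw [pv_seq_succ, pvCycleA]
    exact pv_quarter_dims _ _ (pv_quarter_dims _ _ (pv_quarter_dims _ _ (pv_quarter_dims _ _ ih)))

theorem pv_seq_alpha (x0 : List (List Char)) (k : Nat) (h : 1 ≤ k) :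
    pvAlpha (pvSeq x0 k) := by
  obtain ⟨k', rfl⟩ := Nat.exists_eq_add_of_le h
  rw [Nat.add_comm, pv_seq_succ, pvCycleA]
  exact pv_quarter_alpha _

-- ---------- encoding and the pigeonhole bound ----------

def pvEncChar (ch : Char) : Fin 4 :=
  if ch = '.' then 0 else if ch = 'O' then 1 else 2

def pvEncState : List (List Char) → List (Fin 4)
  | [] => []
  | r :: rs => r.map pvEncChar ++ (3 : Fin 4) :: pvEncState rs

def pvEncNum (l : List (Fin 4)) : Nat :=
  l.foldl (fun a d => 5 * a + (d.val + 1)) 0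

theorem pv_encnum_shift (l : List (Fin 4)) (a : Nat) :
    l.foldl (fun a d => 5 * a + (d.val + 1)) a = a * 5 ^ l.length + pvEncNum l := by
  induction l generalizing a with
  | nil => simp [pvEncNum]
  | cons c t ih =>
    simp only [List.foldl_cons, List.length_cons]
    rw [ih (5 * a + (c.val + 1))]
    have h2 : pvEncNum (c :: t) = (c.val + 1) * 5 ^ t.length + pvEncNum t := by
      rw [show pvEncNum (c :: t) =
          List.foldl (fun a d => 5 * a + (d.val + 1)) (5 * 0 + (c.val + 1)) t from rfl,
        ih (5 * 0 + (c.val + 1))]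
      ring
    rw [h2]
    ring

theorem pv_encnum_cons (c : Fin 4) (t : List (Fin 4)) :
    pvEncNum (c :: t) = (c.val + 1) * 5 ^ t.length + pvEncNum t := by
  rw [show pvEncNum (c :: t) =
      List.foldl (fun a d => 5 * a + (d.val + 1)) (5 * 0 + (c.val + 1)) t from rfl,
    pv_encnum_shift]
  ring

theorem pv_encnum_lt (l : List (Fin 4)) : pvEncNum l < 5 ^ l.length := by
  induction l with
  | nil => simp [pvEncNum]
  | cons c t ih =>
    have h2 : pvEncNum (c :: t) = (c.val + 1) * 5 ^ t.length + pvEncNum t := pv_encnum_cons c t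
    rw [h2]
    have hc : c.val + 1 ≤ 4 := by omega
    have : (c.val + 1) * 5 ^ t.length ≤ 4 * 5 ^ t.length :=
      Nat.mul_le_mul_right _ hc
    calc (c.val + 1) * 5 ^ t.length + pvEncNum t < (c.val + 1) * 5 ^ t.length + 5 ^ t.length :=
          Nat.add_lt_add_left ih _
    _ ≤ 4 * 5 ^ t.length + 5 ^ t.length := Nat.add_le_add_right this _
    _ = 5 ^ (t.length + 1) := by ring
    _ = 5 ^ (c :: t).length := by simp

theorem pv_encnum_ge (c : Fin 4) (l : List (Fin 4)) : 5 ^ l.length ≤ pvEncNum (c :: l) := by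
  have h2 : pvEncNum (c :: l) = (c.val + 1) * 5 ^ l.length + pvEncNum l := pv_encnum_cons c l
  rw [h2]
  have : 1 * 5 ^ l.length ≤ (c.val + 1) * 5 ^ l.length :=
    Nat.mul_le_mul_right _ (by omega)
  omega

theorem pv_digit_cancel (d1 d2 r1 r2 X : Nat) (_hX : 0 < X) (h1 : r1 < X) (h2 : r2 < X)
    (h : d1 * X + r1 = d2 * X + r2) : d1 = d2 ∧ r1 = r2 := by
  have hd : d1 = d2 := by
    by_contra hne
    rcases Nat.lt_or_ge d1 d2 with hlt | hge
    · have hle : (d1 + 1) * X ≤ d2 * X := Nat.mul_le_mul_right X (by omega)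
      have hs : (d1 + 1) * X = d1 * X + X := by ring
      omega
    · have hlt2 : d2 < d1 := by omega
      have hle : (d2 + 1) * X ≤ d1 * X := Nat.mul_le_mul_right X (by omega)
      have hs : (d2 + 1) * X = d2 * X + X := by ring
      omega
  subst hd
  exact ⟨rfl, by omega⟩

theorem pv_encnum_inj (l1 l2 : List (Fin 4)) (h : pvEncNum l1 = pvEncNum l2) : l1 = l2 := by
  induction l1 generalizing l2 with
  | nil =>
    cases l2 with
    | nil => rfl
    | cons c2 t2 =>
      have := pv_encnum_ge c2 t2
      have h0 : pvEncNum ([] : List (Fin 4)) = 0 := by simp [pvEncNum]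
      have hp : 0 < 5 ^ t2.length := Nat.pow_pos (by omega)
      omega
  | cons c1 t1 ih =>
    cases l2 with
    | nil =>
      have := pv_encnum_ge c1 t1
      have h0 : pvEncNum ([] : List (Fin 4)) = 0 := by simp [pvEncNum]
      have hp : 0 < 5 ^ t1.length := Nat.pow_pos (by omega)
      omega
    | cons c2 t2 =>
      have e1 : pvEncNum (c1 :: t1) = (c1.val + 1) * 5 ^ t1.length + pvEncNum t1 := pv_encnum_cons c1 t1
      have e2 : pvEncNum (c2 :: t2) = (c2.val + 1) * 5 ^ t2.length + pvEncNum t2 := pv_encnum_cons c2 t2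
      have hlen : t1.length = t2.length := by
        by_contra hne
        rcases Nat.lt_or_ge t1.length t2.length with hlt | hge
        · have hb1 : pvEncNum (c1 :: t1) < 5 ^ (t1.length + 1) := by
            have := pv_encnum_lt (c1 :: t1); simpa using this
          have hb2 : 5 ^ t2.length ≤ pvEncNum (c2 :: t2) := pv_encnum_ge c2 t2
          have : (5:Nat) ^ (t1.length + 1) ≤ 5 ^ t2.length :=
            Nat.pow_le_pow_right (by omega) (by omega)
          omega
        · have hlt2 : t2.length < t1.length := by omega
          have hb1 : pvEncNum (c2 :: t2) < 5 ^ (t2.length + 1) := by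
            have := pv_encnum_lt (c2 :: t2); simpa using this
          have hb2 : 5 ^ t1.length ≤ pvEncNum (c1 :: t1) := pv_encnum_ge c1 t1
          have : (5:Nat) ^ (t2.length + 1) ≤ 5 ^ t1.length :=
            Nat.pow_le_pow_right (by omega) (by omega)
          omega
      have hX : (0:Nat) < 5 ^ t1.length := Nat.pow_pos (by omega)
      have ht1 : pvEncNum t1 < 5 ^ t1.length := pv_encnum_lt t1
      have ht2 : pvEncNum t2 < 5 ^ t2.length := pv_encnum_lt t2
      rw [e1, e2, ← hlen] at h
      obtain ⟨hd, hr⟩ := pv_digit_cancel _ _ _ _ _ hX ht1 (hlen ▸ ht2) h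
      rw [ih t2 hr, Fin.ext (show c1.val = c2.val by omega)]

theorem pv_append_sep_inj {α : Type} (x : α) (a b u v : List α)
    (h : a ++ x :: u = b ++ x :: v) (ha : x ∉ a) (hb : x ∉ b) : a = b ∧ u = v := by
  induction a generalizing b with
  | nil =>
    cases b with
    | nil => simpa using h
    | cons y bt =>
      simp only [List.nil_append, List.cons_append, List.cons_eq_cons] at h
      exact absurd (h.1 ▸ List.mem_cons_self) hb
  | cons y at_ ih =>
    cases b with
    | nil =>
      simp only [List.cons_append, List.nil_append, List.cons_eq_cons] at h
      exact absurd (h.1.symm ▸ List.mem_cons_self) ha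
    | cons z bt =>
      simp only [List.cons_append, List.cons_eq_cons] at h
      obtain ⟨rfl, h2⟩ := h
      obtain ⟨h3, h4⟩ := ih bt h2 (fun hm => ha (List.mem_cons_of_mem _ hm))
        (fun hm => hb (List.mem_cons_of_mem _ hm))
      exact ⟨by rw [h3], h4⟩

theorem pv_encrow_inj (r1 r2 : List Char)
    (ha1 : ∀ ch ∈ r1, ch = '.' ∨ ch = 'O' ∨ ch = '#')
    (ha2 : ∀ ch ∈ r2, ch = '.' ∨ ch = 'O' ∨ ch = '#')
    (h : r1.map pvEncChar = r2.map pvEncChar) : r1 = r2 := by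
  induction r1 generalizing r2 with
  | nil =>
    cases r2 with
    | nil => rfl
    | cons c2 t2 => simp at h
  | cons c1 t1 ih =>
    cases r2 with
    | nil => simp at h
    | cons c2 t2 =>
      simp only [List.map_cons, List.cons_eq_cons] at h
      have hc : c1 = c2 := by
        have e1 := ha1 c1 (by simp)
        have e2 := ha2 c2 (by simp)
        have := h.1
        unfold pvEncChar at this
        rcases e1 with rfl | rfl | rfl <;> rcases e2 with rfl | rfl | rfl <;> simp_all
      rw [hc, ih t2 (fun ch hm => ha1 ch (List.mem_cons_of_mem _ hm))
        (fun ch hm => ha2 ch (List.mem_cons_of_mem _ hm)) h.2]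

theorem pv_encstate_inj (s1 s2 : List (List Char)) (h1 : pvAlpha s1) (h2 : pvAlpha s2)
    (h : pvEncState s1 = pvEncState s2) : s1 = s2 := by
  induction s1 generalizing s2 with
  | nil =>
    cases s2 with
    | nil => rfl
    | cons r2 rs2 => simp [pvEncState] at h
  | cons r1 rs1 ih =>
    cases s2 with
    | nil => simp [pvEncState] at h
    | cons r2 rs2 =>
      simp only [pvEncState] at h
      have hno : ∀ (r : List Char), (3 : Fin 4) ∉ r.map pvEncChar := by
        intro r hm
        obtain ⟨ch, _, hch⟩ := List.mem_map.mp hm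
        unfold pvEncChar at hch
        split_ifs at hch <;> simp_all
      obtain ⟨hrow, hrest⟩ := pv_append_sep_inj (3 : Fin 4) _ _ _ _ h (hno r1) (hno r2)
      have hr12 : r1 = r2 :=
        pv_encrow_inj r1 r2 (h1 r1 (by simp)) (h2 r2 (by simp)) hrow
      rw [hr12, ih rs2 (fun r hr => h1 r (List.mem_cons_of_mem _ hr))
        (fun r hr => h2 r (List.mem_cons_of_mem _ hr)) hrest]

theorem pv_encstate_len (st : List (List Char)) (M : Nat) (h : pvDims M st) :
    (pvEncState st).length ≤ M * (M + 1) := by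
  obtain ⟨hlen, hrows⟩ := h
  have key : ∀ (l : List (List Char)), (∀ r ∈ l, r.length ≤ M) →
      (pvEncState l).length ≤ l.length * (M + 1) := by
    intro l
    induction l with
    | nil => simp [pvEncState]
    | cons r rs ih =>
      intro hr
      simp only [pvEncState, List.length_append, List.length_map, List.length_cons]
      have h1 := hr r (by simp)
      have h2 := ih (fun r' hr' => hr r' (List.mem_cons_of_mem _ hr'))
      have : (rs.length + 1) * (M + 1) = rs.length * (M + 1) + (M + 1) := by ring
      omega
  calc (pvEncState st).length ≤ st.length * (M + 1) := key st hrows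
  _ ≤ M * (M + 1) := Nat.mul_le_mul_right _ hlen

theorem pv_rep (x0 : List (List Char)) :
    ∃ n, (∃ j, j < n ∧ pvSeq x0 j = pvSeq x0 n) ∧ n ≤ 5 ^ (pvM x0 * (pvM x0 + 1)) + 1 := by
  set B := 5 ^ (pvM x0 * (pvM x0 + 1)) with hB
  have hmaps : ∀ k ∈ Finset.range (B + 1),
      pvEncNum (pvEncState (pvSeq x0 (k + 1))) ∈ Finset.range B := by
    intro k _
    rw [Finset.mem_range, hB]
    calc pvEncNum (pvEncState (pvSeq x0 (k + 1)))
        < 5 ^ (pvEncState (pvSeq x0 (k + 1))).length := pv_encnum_lt _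
    _ ≤ 5 ^ (pvM x0 * (pvM x0 + 1)) :=
        Nat.pow_le_pow_right (by omega)
          (pv_encstate_len _ _ (pv_seq_dims x0 (k + 1)))
  have hcard : (Finset.range B).card < (Finset.range (B + 1)).card := by
    simp
  obtain ⟨a, ha, b, hb, hne, heq⟩ :=
    Finset.exists_ne_map_eq_of_card_lt_of_maps_to hcard hmaps
  have hseq : pvSeq x0 (a + 1) = pvSeq x0 (b + 1) := by
    apply pv_encstate_inj _ _ (pv_seq_alpha x0 (a + 1) (by omega))
      (pv_seq_alpha x0 (b + 1) (by omega))
    exact pv_encnum_inj _ _ heq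
  rw [Finset.mem_range] at ha hb
  rcases Nat.lt_or_gt_of_ne hne with hab | hab
  · exact ⟨b + 1, ⟨a + 1, by omega, hseq⟩, by omega⟩
  · exact ⟨a + 1, ⟨b + 1, by omega, hseq.symm⟩, by omega⟩

-- ---------- first repeat index N, first occurrence J ----------

def pvRepP (x0 : List (List Char)) (n : Nat) : Prop :=
  ∃ j, j < n ∧ pvSeq x0 j = pvSeq x0 n

theorem pv_repP_ex (x0 : List (List Char)) : ∃ n, pvRepP x0 n :=
  ⟨(pv_rep x0).choose, ((pv_rep x0).choose_spec).1⟩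

noncomputable def pvN (x0 : List (List Char)) : Nat :=
  @Nat.find (pvRepP x0) (Classical.decPred _) (pv_repP_ex x0)

theorem pvN_spec (x0 : List (List Char)) : pvRepP x0 (pvN x0) := by
  unfold pvN; exact @Nat.find_spec (pvRepP x0) (Classical.decPred _) (pv_repP_ex x0)

theorem pvN_min (x0 : List (List Char)) (m : Nat) (h : m < pvN x0) : ¬ pvRepP x0 m := by
  unfold pvN at h; exact @Nat.find_min (pvRepP x0) (Classical.decPred _) (pv_repP_ex x0) m h

theorem pvN_le (x0 : List (List Char)) (n : Nat) (h : pvRepP x0 n) : pvN x0 ≤ n := by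
  unfold pvN; exact @Nat.find_le n (pvRepP x0) (Classical.decPred _) (pv_repP_ex x0) h

theorem pv_seq_inj (x0 : List (List Char)) (a b : Nat) (hab : a < b) (hb : b < pvN x0) :
    pvSeq x0 a ≠ pvSeq x0 b := by
  intro he
  exact pvN_min x0 b hb ⟨a, hab, he⟩

def pvJP (x0 : List (List Char)) (j : Nat) : Prop :=
  j < pvN x0 ∧ pvSeq x0 j = pvSeq x0 (pvN x0)

theorem pv_jP_ex (x0 : List (List Char)) : ∃ j, pvJP x0 j := pvN_spec x0

noncomputable def pvJ (x0 : List (List Char)) : Nat :=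
  @Nat.find (pvJP x0) (Classical.decPred _) (pv_jP_ex x0)

theorem pvJ_spec (x0 : List (List Char)) : pvJP x0 (pvJ x0) := by
  unfold pvJ; exact @Nat.find_spec (pvJP x0) (Classical.decPred _) (pv_jP_ex x0)

theorem pvN_bound (x0 : List (List Char)) : pvN x0 ≤ 5 ^ (pvM x0 * (pvM x0 + 1)) + 1 := by
  obtain ⟨n, hn, hb⟩ := pv_rep x0
  exact le_trans (pvN_le x0 n hn) hb

-- ---------- the visited dictionary after t iterations ----------

def pvDAt (x0 : List (List Char)) (t : Nat) : PySem.Dict (List (List Char)) Int :=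
  (List.range t).foldl (fun d j => d.insert (pvSeq x0 j) (j : Int)) PySem.Dict.empty

theorem pvDAt_succ (x0 : List (List Char)) (t : Nat) :
    pvDAt x0 (t + 1) = (pvDAt x0 t).insert (pvSeq x0 t) (t : Int) := by
  unfold pvDAt; rw [List.range_succ, List.foldl_append]; rfl

theorem pv_get_dAt_some (x0 : List (List Char)) (t j : Nat) (hj : j < t) (ht : t ≤ pvN x0) :
    (pvDAt x0 t).get? (pvSeq x0 j) = some (j : Int) := by
  induction t with
  | zero => omega
  | succ t ih =>
    rw [pvDAt_succ, PySem.Dict.get?_insert]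
    by_cases hj : j = t
    · subst hj
      rw [if_pos rfl]
    · have hjt : j < t := by omega
      have hne : pvSeq x0 j ≠ pvSeq x0 t :=
        pv_seq_inj x0 j t hjt (by omega)
      rw [if_neg hne]
      exact ih hjt (by omega)

theorem pv_get_dAt_none (x0 : List (List Char)) (t : Nat) (y : List (List Char))
    (h : ∀ j, j < t → pvSeq x0 j ≠ y) : (pvDAt x0 t).get? y = none := by
  induction t with
  | zero => simp [pvDAt, PySem.Dict.get?_empty]
  | succ t ih =>
    rw [pvDAt_succ, PySem.Dict.get?_insert]
    rw [if_neg (fun he => h t (by omega) he.symm)]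
    exact ih (fun j hj => h j (by omega))

-- ---------- loop characterizations ----------

theorem pv_findRepeatA_spec (x0 : List (List Char)) (fuel t : Nat) (ht : t ≤ pvN x0)
    (hf : pvN x0 - t < fuel) :
    pvFindRepeatA fuel (pvDAt x0 t) (t : Int) (pvSeq x0 t) =
      ((pvJ x0 : Int), pvSeq x0 (pvN x0)) := by
  induction fuel generalizing t with
  | zero => omega
  | succ fuel ih =>
    simp only [pvFindRepeatA]
    by_cases hteq : t = pvN x0
    · subst hteq
      obtain ⟨hJlt, hJeq⟩ := pvJ_spec x0
      rw [show pvSeq x0 (pvN x0) = pvSeq x0 (pvJ x0) from hJeq.symm] at *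
      rw [pv_get_dAt_some x0 (pvN x0) (pvJ x0) hJlt le_rfl]
    · have htlt : t < pvN x0 := by omega
      rw [pv_get_dAt_none x0 t (pvSeq x0 t)
        (fun j hj => pv_seq_inj x0 j t hj htlt)]
      rw [show (pvDAt x0 t).insert (pvSeq x0 t) (t : Int) = pvDAt x0 (t + 1) from
        (pvDAt_succ x0 t).symm]
      rw [show ((t : Int) + 1) = ((t + 1 : Nat) : Int) by push_cast; ring]
      rw [show pvCycleA (pvSeq x0 t) = pvSeq x0 (t + 1) from (pv_seq_succ x0 t).symm]
      exact ih (t + 1) (by omega) (by omega)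

theorem pv_findLoopB_spec (x0 : List (List Char)) (fuel t : Nat) (ht : t ≤ pvN x0)
    (hf : pvN x0 - t < fuel) :
    pvFindLoopB fuel (pvDAt x0 t) ((List.range t).map (pvSeq x0)) (pvSeq x0 t) =
      ((List.range (pvN x0)).map (pvSeq x0), (pvJ x0 : Int)) := by
  induction fuel generalizing t with
  | zero => omega
  | succ fuel ih =>
    simp only [pvFindLoopB, pv_cycle_eq]
    by_cases hteq : t = pvN x0
    · subst hteq
      obtain ⟨hJlt, hJeq⟩ := pvJ_spec x0
      rw [show pvSeq x0 (pvN x0) = pvSeq x0 (pvJ x0) from hJeq.symm] at *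
      rw [pv_get_dAt_some x0 (pvN x0) (pvJ x0) hJlt le_rfl]
    · have htlt : t < pvN x0 := by omega
      rw [pv_get_dAt_none x0 t (pvSeq x0 t)
        (fun j hj => pv_seq_inj x0 j t hj htlt)]
      rw [show ((List.range t).map (pvSeq x0)).length = t by simp]
      rw [show (pvDAt x0 t).insert (pvSeq x0 t) (t : Int) = pvDAt x0 (t + 1) from
        (pvDAt_succ x0 t).symm]
      rw [show (List.range t).map (pvSeq x0) ++ [pvSeq x0 t] =
        (List.range (t + 1)).map (pvSeq x0) by rw [List.range_succ]; simp]
      rw [show pvCycleA (pvSeq x0 t) = pvSeq x0 (t + 1) from (pv_seq_succ x0 t).symm]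
      exact ih (t + 1) (by omega) (by omega)

theorem pv_period_iterate (x0 : List (List Char)) :
    pvCycleA^[pvN x0 - pvJ x0] (pvSeq x0 (pvJ x0)) = pvSeq x0 (pvJ x0) := by
  obtain ⟨hJlt, hJeq⟩ := pvJ_spec x0
  have : pvCycleA^[pvN x0 - pvJ x0] (pvCycleA^[pvJ x0] x0) = pvCycleA^[pvN x0] x0 := by
    rw [← Function.iterate_add_apply]
    congr 1
    omega
  calc pvCycleA^[pvN x0 - pvJ x0] (pvSeq x0 (pvJ x0))
      = pvSeq x0 (pvN x0) := this
  _ = pvSeq x0 (pvJ x0) := hJeq.symm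

theorem pv_period_min (x0 : List (List Char)) (k : Nat) (h0 : 0 < k)
    (hk : k < pvN x0 - pvJ x0) : pvCycleA^[k] (pvSeq x0 (pvJ x0)) ≠ pvSeq x0 (pvJ x0) := by
  obtain ⟨hJlt, hJeq⟩ := pvJ_spec x0
  have hiter : pvCycleA^[k] (pvSeq x0 (pvJ x0)) = pvSeq x0 (pvJ x0 + k) := by
    unfold pvSeq
    rw [← Function.iterate_add_apply]
    congr 1
    omega
  rw [hiter]
  exact fun he => pv_seq_inj x0 (pvJ x0) (pvJ x0 + k) (by omega) (by omega) he.symm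

theorem pv_findPeriodA_spec (x0 : List (List Char)) (fuel k : Nat) (h1 : 1 ≤ k)
    (hk : k ≤ pvN x0 - pvJ x0) (hf : pvN x0 - pvJ x0 - k < fuel) :
    pvFindPeriodA fuel (k : Int) (pvCycleA^[k - 1] (pvSeq x0 (pvJ x0))) (pvSeq x0 (pvJ x0)) =
      ((pvN x0 - pvJ x0 : Nat) : Int) := by
  induction fuel generalizing k with
  | zero => omega
  | succ fuel ih =>
    simp only [pvFindPeriodA]
    have hstep : pvCycleA (pvCycleA^[k - 1] (pvSeq x0 (pvJ x0))) =
        pvCycleA^[k] (pvSeq x0 (pvJ x0)) := by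
      conv_rhs => rw [show k = (k - 1) + 1 by omega]
      rw [Function.iterate_succ_apply']
    rw [hstep]
    by_cases hkP : k = pvN x0 - pvJ x0
    · subst hkP
      rw [if_pos (by simp [pv_period_iterate x0])]
    · have hklt : k < pvN x0 - pvJ x0 := by omega
      rw [if_neg (by simpa using pv_period_min x0 k (by omega) hklt)]
      rw [show ((k : Int) + 1) = ((k + 1 : Nat) : Int) by push_cast; ring]
      rw [show pvCycleA^[k] (pvSeq x0 (pvJ x0)) =
        pvCycleA^[(k + 1) - 1] (pvSeq x0 (pvJ x0)) by simp]
      exact ih (k + 1) (by omega) (by omega) (by omega)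

theorem pv_iterA_eq (n : Nat) (st : List (List Char)) :
    pvIterA n st = pvCycleA^[n] st := by
  induction n generalizing st with
  | zero => simp [pvIterA]
  | succ n ih =>
    rw [pvIterA, ih, ← Function.iterate_succ_apply]

-- ---------- assembly ----------

theorem pv_main (input_ : List String) : part2 input_ = part2_alt input_ := by
  set x0 := input_.map (fun row => PySem.Chars.strip row.toList) with hx0
  show ((PySem.List.enumerate
      ((pvIterA (PySem.Int.mod (1000000000 - (pvFindRepeatA (pvFuel x0) PySem.Dict.empty 0 x0).1)
          (pvFindPeriodA (pvFuel x0) 1 (pvFindRepeatA (pvFuel x0) PySem.Dict.empty 0 x0).2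
            (pvFindRepeatA (pvFuel x0) PySem.Dict.empty 0 x0).2)).toNat
        (pvFindRepeatA (pvFuel x0) PySem.Dict.empty 0 x0).2).reverse) 1).map
      (fun q => (PySem.Chars.count q.2 ['O'] : Int) * q.1)).sum =
    (match PySem.List.pyGet? (pvFindLoopB (pvFuel x0) PySem.Dict.empty [] x0).1
        ((pvFindLoopB (pvFuel x0) PySem.Dict.empty [] x0).2 +
         PySem.Int.mod (1000000000 - (pvFindLoopB (pvFuel x0) PySem.Dict.empty [] x0).2)
           (((pvFindLoopB (pvFuel x0) PySem.Dict.empty [] x0).1.length : Int) -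
            (pvFindLoopB (pvFuel x0) PySem.Dict.empty [] x0).2)) with
    | none => (0 : Int)
    | some final => ((PySem.List.enumerate final.reverse 1).map
        (fun q => (PySem.Chars.count q.2 ['O'] : Int) * q.1)).sum)
  obtain ⟨hJlt, hJeq⟩ := pvJ_spec x0
  have hNf : pvN x0 < pvFuel x0 := by
    have := pvN_bound x0
    unfold pvFuel
    omega
  -- phase 1 of A / the single pass of B
  have hA1 : pvFindRepeatA (pvFuel x0) PySem.Dict.empty 0 x0 =
      ((pvJ x0 : Int), pvSeq x0 (pvN x0)) := by
    have := pv_findRepeatA_spec x0 (pvFuel x0) 0 (by omega) (by omega)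
    simpa [pvDAt, pvSeq] using this
  have hB1 : pvFindLoopB (pvFuel x0) PySem.Dict.empty [] x0 =
      ((List.range (pvN x0)).map (pvSeq x0), (pvJ x0 : Int)) := by
    have := pv_findLoopB_spec x0 (pvFuel x0) 0 (by omega) (by omega)
    simpa [pvDAt, pvSeq] using this
  rw [hA1, hB1]
  -- phase 2 of A: the period is N - J
  have hA2 : pvFindPeriodA (pvFuel x0) 1 (pvSeq x0 (pvN x0)) (pvSeq x0 (pvN x0)) =
      ((pvN x0 - pvJ x0 : Nat) : Int) := by
    rw [← hJeq]
    have := pv_findPeriodA_spec x0 (pvFuel x0) 1 le_rfl (by omega) (by omega)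
    simpa using this
  rw [hA2]
  simp only []
  -- the two mod expressions coincide
  have hPcast : ((List.range (pvN x0)).map (pvSeq x0)).length = pvN x0 := by simp
  rw [hPcast]
  have hperiod : ((pvN x0 : Int)) - ((pvJ x0 : Int)) = ((pvN x0 - pvJ x0 : Nat) : Int) := by
    push_cast [Nat.cast_sub (le_of_lt hJlt)]
    ring
  rw [hperiod]
  set P : Nat := pvN x0 - pvJ x0 with hP
  set m : Int := PySem.Int.mod (1000000000 - (pvJ x0 : Int)) ((P : Nat) : Int) with hm
  have hPpos : (0 : Int) < ((P : Nat) : Int) := by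
    have : 0 < P := by omega
    exact_mod_cast this
  have hm0 : 0 ≤ m := PySem.Int.mod_nonneg _ hPpos
  have hmP : m < ((P : Nat) : Int) := PySem.Int.mod_lt _ hPpos
  have hmP' : m.toNat < P := by omega
  -- A's final state
  have hfinalA : pvIterA m.toNat (pvSeq x0 (pvN x0)) = pvSeq x0 (pvJ x0 + m.toNat) := by
    rw [← hJeq, pv_iterA_eq]
    unfold pvSeq
    rw [← Function.iterate_add_apply]
    congr 1
    omega
  rw [hfinalA]
  -- B's indexing into the trail
  have htarget : (pvJ x0 : Int) + m = ((pvJ x0 + m.toNat : Nat) : Int) := by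
    push_cast [Int.toNat_of_nonneg hm0]
    ring
  rw [htarget, PySem.List.pyGet?_natCast]
  have hidx : ((List.range (pvN x0)).map (pvSeq x0))[pvJ x0 + m.toNat]? =
      some (pvSeq x0 (pvJ x0 + m.toNat)) := by
    have hlt : pvJ x0 + m.toNat < pvN x0 := by omega
    simp [hlt]
  rw [hidx]

-- ===== VERDICT (by name: the statement is the Claim_ definition above) =====
theorem part2_spec : Claim_equal_part2 := by
  intro input_ _hdom
  unfold Spec_part2
  exact pv_main input_
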